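-- pv_equiv track=rewrite | github.com/Pedr0S22/code-quality-toolkit | DEV/code_quality_toolkit/src/toolkit/plugins/style_checker/documentation_plugin.py | _count_docstrings
-- ===== SOURCE A (Python) =====
-- from typing import Any, Dict, List, Tuple
--
-- def _count_docstrings(lines: List[str]) -> int:
--     """Cuenta las líneas que forman parte de docstrings."""
--     docstring_lines = 0
--     in_docstring = False
--     for line in lines:
--         stripped = line.strip()
--         if stripped.startswith('"""') or stripped.startswith("'''"):
--             if in_docstring:
--                 in_docstring = False
--             else:
--                 in_docstring = True
--             docstring_lines += 1
--         elif in_docstring: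
--             docstring_lines += 1
--     return docstring_lines
-- ===== SOURCE B (Python) =====
-- from typing import Any, Dict, List, Tuple
--
-- def _count_docstrings(lines: List[str]) -> int:
--     """Counts docstring lines: a line counts iff it is a triple-quote delimiter
--     line, or the number of delimiter lines before it is odd (it sits inside an
--     open docstring). Three passes: flags, prefix parities, then a count."""
--     flags = [line.strip().startswith(('"""', "'''")) for line in lines]
--     seen = 0
--     parities = []
--     for f in flags:
--         parities.append(seen % 2 == 1)
--         seen += f
--     return sum(1 for f, p in zip(flags, parities) if f or p)
-- ===== Notes on version B (the rewrite author's own statement) =====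
-- stated objective: alternative
-- what changed: Replaces A's single stateful toggle loop by a declarative three-pass pipeline: a delimiter-flag list, a prefix-parity list, and a count of lines that are delimiters or have odd prefix parity.
import Mathlib
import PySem

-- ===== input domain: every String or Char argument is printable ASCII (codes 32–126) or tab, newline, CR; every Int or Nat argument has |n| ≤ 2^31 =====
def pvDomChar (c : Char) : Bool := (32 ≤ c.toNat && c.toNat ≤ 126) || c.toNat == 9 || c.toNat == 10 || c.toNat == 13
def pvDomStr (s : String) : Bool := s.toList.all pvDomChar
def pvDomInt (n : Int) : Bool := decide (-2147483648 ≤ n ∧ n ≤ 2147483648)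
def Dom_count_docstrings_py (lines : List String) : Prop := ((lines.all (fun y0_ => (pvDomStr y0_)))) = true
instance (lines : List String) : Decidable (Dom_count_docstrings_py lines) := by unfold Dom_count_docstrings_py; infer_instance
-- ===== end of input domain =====

-- B replaces A's stateful toggle loop by a per-line prefix-parity characterization (alternative decomposition, same cost).

-- ===== PORT A =====
-- shared helper: stripped line starts with a triple quote (both Pythons compute this expression verbatim)
def pvIsDelim (line : String) : Bool :=
  let stripped := PySem.Str.strip line
  PySem.Str.startswith stripped "\"\"\"" || PySem.Str.startswith stripped "'''"

def count_docstrings_py (lines : List String) : Int :=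
  (lines.foldl
    (fun (st : Int × Bool) line =>
      if pvIsDelim line then
        (st.1 + 1, if st.2 then false else true)
      else if st.2 then
        (st.1 + 1, st.2)
      else st)
    (0, false)).1

-- ===== PORT B =====
def count_docstrings_py_alt (lines : List String) : Int :=
  let flags := lines.map pvIsDelim
  -- seen = 0; parities = []; for f in flags: parities.append(seen % 2 == 1); seen += f
  let sp := flags.foldl
    (fun (st : Int × List Bool) f =>
      (st.1 + (if f then 1 else 0), st.2 ++ [decide (st.1 % 2 = 1)]))
    (0, [])
  (flags.zip sp.2).foldl (fun acc p => if p.1 || p.2 then acc + 1 else acc) 0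

-- ===== PRECONDITION & SPEC =====
def Spec_count_docstrings_py (lines : List String) (out : Int) : Prop := out = count_docstrings_py_alt lines
instance (lines : List String) (out : Int) : Decidable (Spec_count_docstrings_py lines out) := by unfold Spec_count_docstrings_py; infer_instance

-- ===== CLAIM (what is proved, stated in full; the proofs are below) =====
def Claim_equal_count_docstrings_py : Prop := ∀ (lines : List String), Dom_count_docstrings_py lines → Spec_count_docstrings_py lines (count_docstrings_py lines)

-- ===== LEMMAS AND PROOFS =====

-- A's loop body on the per-line delimiter flag
def pvStepA (st : Int × Bool) (b : Bool) : Int × Bool :=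
  if b then (st.1 + 1, if st.2 then false else true)
  else if st.2 then (st.1 + 1, st.2)
  else st

-- the parity list B's middle loop produces, as a structural recursion
def pvParList : List Bool → Int → List Bool
  | [], _ => []
  | b :: bs, c => decide (c % 2 = 1) :: pvParList bs (c + (if b then 1 else 0))

theorem pvFoldPar (bs : List Bool) : ∀ (c : Int) (l : List Bool),
    (bs.foldl
      (fun (st : Int × List Bool) f =>
        (st.1 + (if f then 1 else 0), st.2 ++ [decide (st.1 % 2 = 1)]))
      (c, l)).2 = l ++ pvParList bs c := by
  induction bs with
  | nil => intro c l; simp [pvParList]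
  | cons b bs ih =>
    intro c l
    simp only [List.foldl_cons, pvParList]
    rw [ih]
    simp

theorem pvZipFold (bs : List Bool) : ∀ (c acc : Int),
    (bs.zip (pvParList bs c)).foldl
      (fun acc p => if p.1 || p.2 then acc + 1 else acc) acc
    = (bs.foldl pvStepA (acc, decide (c % 2 = 1))).1 := by
  induction bs with
  | nil => intro c acc; simp [pvParList]
  | cons b bs ih =>
    intro c acc
    simp only [pvParList, List.zip_cons_cons, List.foldl_cons]
    rw [ih]
    have hst : pvStepA (acc, decide (c % 2 = 1)) b
        = (if b || decide (c % 2 = 1) then acc + 1 else acc,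
           decide ((c + (if b then 1 else 0)) % 2 = 1)) := by
      rcases Int.emod_two_eq c with h | h <;>
        cases b <;>
        simp [pvStepA, h] <;> omega
    rw [hst]

-- ===== VERDICT (by name: the statement is the Claim_ definition above) =====
theorem count_docstrings_py_spec : Claim_equal_count_docstrings_py := by
  intro lines _
  show count_docstrings_py lines = count_docstrings_py_alt lines
  show (lines.foldl
      (fun (st : Int × Bool) line =>
        if pvIsDelim line then (st.1 + 1, if st.2 then false else true)
        else if st.2 then (st.1 + 1, st.2) else st) (0, false)).1
    = ((lines.map pvIsDelim).zip
        ((lines.map pvIsDelim).foldl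
          (fun (st : Int × List Bool) f =>
            (st.1 + (if f then 1 else 0), st.2 ++ [decide (st.1 % 2 = 1)]))
          (0, [])).2).foldl
        (fun acc p => if p.1 || p.2 then acc + 1 else acc) 0
  rw [pvFoldPar (lines.map pvIsDelim) 0 [], List.nil_append,
      pvZipFold (lines.map pvIsDelim) 0 0, List.foldl_map]
  rfl
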